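-- pv_equiv track=rewrite | github.com/Grzegorz-Oledzki/advent-of-code | day6_2018.py | get_all_numbers_of_closest_points
-- ===== SOURCE A (Python) =====
-- def coords_extremes(x_coords, y_coords):
--     return min(x_coords), max(x_coords), min(y_coords), max(y_coords)
--
-- def get_number_of_closest_points_and_check_if_coord_is_finite(
--     all_distances,
--     all_x_coords,
--     all_y_coords,
--     distances,
--     x_coords,
--     y_coords,
--     distances_index,
-- ):
--     min_x, max_x, min_y, max_y = coords_extremes(x_coords, y_coords)
--     closest_points = 0
--     finest_point = []
--     x_coords_of_the_nearest_points, y_coords_of_the_nearest_points = [], []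
--     for distance_idx, distance in enumerate(distances):
--         count = 0
--         for second_distance in all_distances:
--             if distance < second_distance[distance_idx]:
--                 count += 1
--                 if count == len(all_distances) - 1:
--                     closest_points += 1
--                     x_coords_of_the_nearest_points.append(all_x_coords[distance_idx])
--                     y_coords_of_the_nearest_points.append(all_y_coords[distance_idx])
--     if (
--         min_y not in x_coords_of_the_nearest_points
--         and max_y not in x_coords_of_the_nearest_points
--         and min_x not in y_coords_of_the_nearest_points
--         and max_x not in y_coords_of_the_nearest_points
--     ):
--         finest_point.append((x_coords[distances_index], y_coords[distances_index]))
--     return closest_points, finest_point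
--
-- def get_all_numbers_of_closest_points(
--     all_distances, x_coords, y_coords, all_x_coords, all_y_coords
-- ):
--     numbers_of_closest_points = []
--     finite_coords = []
--     for distances_index, distance in enumerate(all_distances):
--         closest_point, finite_coord = get_number_of_closest_points_and_check_if_coord_is_finite(
--             all_distances,
--             all_x_coords,
--             all_y_coords,
--             distance,
--             x_coords,
--             y_coords,
--             distances_index,
--         )
--         numbers_of_closest_points.append(closest_point)
--         finite_coords.extend(finite_coord)
--     return numbers_of_closest_points, finite_coords
-- ===== SOURCE B (Python) =====
-- def get_all_numbers_of_closest_points(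
--     all_distances, x_coords, y_coords, all_x_coords, all_y_coords
-- ):
--     if not all_distances:
--         return [], []
--     min_x, max_x = min(x_coords), max(x_coords)
--     min_y, max_y = min(y_coords), max(y_coords)
--     n = len(all_distances)
--     m = len(all_distances[0])
--     # one pass over the grid: per-column minimum and its multiplicity
--     col_min = [min([row[j] for row in all_distances]) for j in range(m)]
--     col_cnt = [[row[j] for row in all_distances].count(col_min[j]) for j in range(m)]
--     counts, finite = [], []
--     for i, row in enumerate(all_distances):
--         c = 0
--         xs, ys = [], []
--         for j, v in enumerate(row):
--             # row i wins column j iff it is the strict unique minimum (needs a competitor)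
--             if n > 1 and v == col_min[j] and col_cnt[j] == 1:
--                 c += 1
--                 xs.append(all_x_coords[j])
--                 ys.append(all_y_coords[j])
--         counts.append(c)
--         if (min_y not in xs and max_y not in xs
--                 and min_x not in ys and max_x not in ys):
--             finite.append((x_coords[i], y_coords[i]))
--     return counts, finite
-- ===== Notes on version B (the rewrite author's own statement) =====
-- stated objective: faster
-- what changed: A re-scans all N distance rows for every cell of every row (O(N^2*M)); B precomputes each column's minimum and its multiplicity in one pass over the grid and then decides each cell's 'unique closest' test in O(1), giving O(N*M).
-- outside the precondition, e.g. on get_all_numbers_of_closest_points([[0, 1], [1, 0]], [7], [7], [7, 7], [7, 7]): A returns ([1, 1], []), B returns ([1, 1], [])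
import Mathlib
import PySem

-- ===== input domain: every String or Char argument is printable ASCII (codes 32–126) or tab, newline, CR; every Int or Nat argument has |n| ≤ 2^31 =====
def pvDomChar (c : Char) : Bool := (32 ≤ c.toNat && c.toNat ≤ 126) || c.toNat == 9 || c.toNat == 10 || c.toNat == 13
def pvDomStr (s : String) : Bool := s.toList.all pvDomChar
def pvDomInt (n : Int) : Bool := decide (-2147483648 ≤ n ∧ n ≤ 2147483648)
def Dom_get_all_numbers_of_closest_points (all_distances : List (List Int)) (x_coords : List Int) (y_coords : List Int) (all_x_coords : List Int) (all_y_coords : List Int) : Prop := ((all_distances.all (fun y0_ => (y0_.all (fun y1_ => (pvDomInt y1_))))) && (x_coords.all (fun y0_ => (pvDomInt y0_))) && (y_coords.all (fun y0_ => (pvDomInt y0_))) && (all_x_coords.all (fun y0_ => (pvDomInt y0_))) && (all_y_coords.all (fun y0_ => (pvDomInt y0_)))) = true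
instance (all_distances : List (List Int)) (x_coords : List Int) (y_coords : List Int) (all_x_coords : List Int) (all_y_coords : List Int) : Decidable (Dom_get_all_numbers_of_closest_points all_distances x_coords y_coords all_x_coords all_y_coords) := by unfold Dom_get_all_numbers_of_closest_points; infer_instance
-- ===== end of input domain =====

-- B replaces A's rescan of all N rows for every cell by one precomputed per-column
-- (minimum, multiplicity) table: O(N*M) instead of O(N^2*M).

-- ===== PORT A =====
-- Python min/max raise ValueError on an empty list; Pre_ guarantees the lists are
-- nonempty whenever this helper is reached, so the `.getD 0` defaults are never exercised.
def pvA_coords_extremes (x_coords y_coords : List Int) : Int × Int × Int × Int :=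
  ((PySem.List.min? x_coords (fun v => v)).getD 0, (PySem.List.max? x_coords (fun v => v)).getD 0,
   (PySem.List.min? y_coords (fun v => v)).getD 0, (PySem.List.max? y_coords (fun v => v)).getD 0)

-- body of `for second_distance in all_distances`; state = (count, closest_points, xs_nearest, ys_nearest).
-- `second_distance[distance_idx]` / `all_x_coords[distance_idx]` raise IndexError out of range;
-- Pre_ keeps the indices in range, so the `pyGetD … 0` defaults are never exercised.
def pvA_innerStep (all_distances : List (List Int)) (all_x_coords all_y_coords : List Int)
    (distance distance_idx : Int) :
    (Int × Int × List Int × List Int) → List Int → Int × Int × List Int × List Int :=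
  fun st second_distance =>
    if distance < PySem.List.pyGetD second_distance distance_idx 0 then
      if st.1 + 1 = (all_distances.length : Int) - 1 then
        (st.1 + 1, st.2.1 + 1, st.2.2.1 ++ [PySem.List.pyGetD all_x_coords distance_idx 0],
         st.2.2.2 ++ [PySem.List.pyGetD all_y_coords distance_idx 0])
      else (st.1 + 1, st.2.1, st.2.2.1, st.2.2.2)
    else st

-- body of `for distance_idx, distance in enumerate(distances)`; state = (closest_points, xs, ys)
def pvA_rowStep (all_distances : List (List Int)) (all_x_coords all_y_coords : List Int) :
    (Int × List Int × List Int) → (Int × Int) → Int × List Int × List Int :=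
  fun s p =>
    ((all_distances.foldl (pvA_innerStep all_distances all_x_coords all_y_coords p.2 p.1)
      (0, s.1, s.2.1, s.2.2)).2)

def pvA_helper (all_distances : List (List Int)) (all_x_coords all_y_coords : List Int)
    (distances x_coords y_coords : List Int) (distances_index : Int) :
    Int × List (Int × Int) :=
  let e := pvA_coords_extremes x_coords y_coords
  let st := (PySem.List.enumerate distances 0).foldl
    (pvA_rowStep all_distances all_x_coords all_y_coords) (0, [], [])
  let finest : List (Int × Int) :=
    if e.2.2.1 ∉ st.2.1 ∧ e.2.2.2 ∉ st.2.1 ∧ e.1 ∉ st.2.2 ∧ e.2.1 ∉ st.2.2 then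
      [(PySem.List.pyGetD x_coords distances_index 0, PySem.List.pyGetD y_coords distances_index 0)]
    else []
  (st.1, finest)

def get_all_numbers_of_closest_points (all_distances : List (List Int)) (x_coords : List Int) (y_coords : List Int) (all_x_coords : List Int) (all_y_coords : List Int) : List Int × (List (Int × Int)) :=
  (PySem.List.enumerate all_distances 0).foldl
    (fun acc p =>
      let r := pvA_helper all_distances all_x_coords all_y_coords p.2 x_coords y_coords p.1
      (acc.1 ++ [r.1], acc.2 ++ r.2))
    ([], [])

-- ===== PORT B =====
-- `[row[j] for row in all_distances]` (column j)
def pvB_col (all_distances : List (List Int)) (j : Int) : List Int :=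
  all_distances.map (fun row => PySem.List.pyGetD row j 0)

-- `col_min = [min([row[j] for row in all_distances]) for j in range(m)]`
def pvB_colmin (all_distances : List (List Int)) (m : Int) : List Int :=
  (PySem.List.pyRange 0 m 1).map
    (fun j => (PySem.List.min? (pvB_col all_distances j) (fun v => v)).getD 0)

-- `col_cnt = [[row[j] for row in all_distances].count(col_min[j]) for j in range(m)]`
def pvB_colcnt (all_distances : List (List Int)) (m : Int) : List Int :=
  (PySem.List.pyRange 0 m 1).map
    (fun j => ((pvB_col all_distances j).count
        (PySem.List.pyGetD (pvB_colmin all_distances m) j 0) : Int))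

-- body of `for j, v in enumerate(row)`; state = (c, xs, ys)
def pvB_colStep (n : Int) (col_min col_cnt all_x_coords all_y_coords : List Int) :
    (Int × List Int × List Int) → (Int × Int) → Int × List Int × List Int :=
  fun s q =>
    if 1 < n ∧ q.2 = PySem.List.pyGetD col_min q.1 0 ∧ PySem.List.pyGetD col_cnt q.1 0 = 1 then
      (s.1 + 1, s.2.1 ++ [PySem.List.pyGetD all_x_coords q.1 0],
       s.2.2 ++ [PySem.List.pyGetD all_y_coords q.1 0])
    else s

-- body of `for i, row in enumerate(all_distances)`; acc = (counts, finite)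
def pvB_rowStep (n : Int) (col_min col_cnt : List Int) (min_x max_x min_y max_y : Int)
    (x_coords y_coords all_x_coords all_y_coords : List Int) :
    (List Int × List (Int × Int)) → (Int × List Int) → List Int × List (Int × Int) :=
  fun acc p =>
    let st := (PySem.List.enumerate p.2 0).foldl
      (pvB_colStep n col_min col_cnt all_x_coords all_y_coords) (0, [], [])
    let fin : List (Int × Int) :=
      if min_y ∉ st.2.1 ∧ max_y ∉ st.2.1 ∧ min_x ∉ st.2.2 ∧ max_x ∉ st.2.2 then
        [(PySem.List.pyGetD x_coords p.1 0, PySem.List.pyGetD y_coords p.1 0)]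
      else []
    (acc.1 ++ [st.1], acc.2 ++ fin)

def get_all_numbers_of_closest_points_alt (all_distances : List (List Int)) (x_coords : List Int) (y_coords : List Int) (all_x_coords : List Int) (all_y_coords : List Int) : List Int × (List (Int × Int)) :=
  match all_distances with
  | [] => ([], [])
  | r0 :: rest =>
    (PySem.List.enumerate (r0 :: rest) 0).foldl
      (pvB_rowStep ((r0 :: rest).length : Int)
        (pvB_colmin (r0 :: rest) (r0.length : Int)) (pvB_colcnt (r0 :: rest) (r0.length : Int))
        ((PySem.List.min? x_coords (fun v => v)).getD 0) ((PySem.List.max? x_coords (fun v => v)).getD 0)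
        ((PySem.List.min? y_coords (fun v => v)).getD 0) ((PySem.List.max? y_coords (fun v => v)).getD 0)
        x_coords y_coords all_x_coords all_y_coords)
      ([], [])

-- ===== PRECONDITION & SPEC =====
-- Pre_ excludes the inputs on which Python A raises: ragged grids (a longer row indexes a
-- shorter one → IndexError), empty x/y coordinate lists with a nonempty grid (ValueError in
-- min/max), and coordinate lists shorter than the grid demands (IndexError when a nearest
-- point / finite coordinate is recorded).  Because the short-coordinate-list IndexErrors are
-- data-dependent, this closed-form bound is conservative: it also excludes some inputs on
-- which A happens to return (and B returns the same value there; see the cited examples).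
def Pre_get_all_numbers_of_closest_points (all_distances : List (List Int)) (x_coords : List Int) (y_coords : List Int) (all_x_coords : List Int) (all_y_coords : List Int) : Prop :=
  (∀ s ∈ all_distances, s.length = (all_distances.headD []).length) ∧
  all_distances.length ≤ x_coords.length ∧ all_distances.length ≤ y_coords.length ∧
  (all_distances.headD []).length ≤ all_x_coords.length ∧
  (all_distances.headD []).length ≤ all_y_coords.length
instance (all_distances : List (List Int)) (x_coords : List Int) (y_coords : List Int) (all_x_coords : List Int) (all_y_coords : List Int) : Decidable (Pre_get_all_numbers_of_closest_points all_distances x_coords y_coords all_x_coords all_y_coords) := by unfold Pre_get_all_numbers_of_closest_points; infer_instance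

def pvWitness_get_all_numbers_of_closest_points : List (List Int) × List Int × List Int × List Int × List Int :=
  ([[0, 1], [1, 0]], [0, 1], [0, 1], [0, 1], [0, 1])

def Spec_get_all_numbers_of_closest_points (all_distances : List (List Int)) (x_coords : List Int) (y_coords : List Int) (all_x_coords : List Int) (all_y_coords : List Int) (out : List Int × (List (Int × Int))) : Prop := out = get_all_numbers_of_closest_points_alt all_distances x_coords y_coords all_x_coords all_y_coords
instance (all_distances : List (List Int)) (x_coords : List Int) (y_coords : List Int) (all_x_coords : List Int) (all_y_coords : List Int) (out : List Int × (List (Int × Int))) : Decidable (Spec_get_all_numbers_of_closest_points all_distances x_coords y_coords all_x_coords all_y_coords out) := by unfold Spec_get_all_numbers_of_closest_points; infer_instance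

-- ===== CLAIM (what is proved, stated in full; the proofs are below) =====
def Claim_equal_get_all_numbers_of_closest_points : Prop := ∀ (all_distances : List (List Int)) (x_coords : List Int) (y_coords : List Int) (all_x_coords : List Int) (all_y_coords : List Int), Dom_get_all_numbers_of_closest_points all_distances x_coords y_coords all_x_coords all_y_coords → Pre_get_all_numbers_of_closest_points all_distances x_coords y_coords all_x_coords all_y_coords → Spec_get_all_numbers_of_closest_points all_distances x_coords y_coords all_x_coords all_y_coords (get_all_numbers_of_closest_points all_distances x_coords y_coords all_x_coords all_y_coords)


-- ===== LEMMAS AND PROOFS =====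

-- A's inner loop when the running count has already reached len-1: it never fires again.
theorem pvA_inner_sat (ad : List (List Int)) (ax ay : List Int) (v j : Int)
    (rows : List (List Int)) (c cl : Int) (xs ys : List Int)
    (hc : (ad.length : Int) - 1 ≤ c) :
    rows.foldl (pvA_innerStep ad ax ay v j) (c, cl, xs, ys)
      = (c + (rows.countP (fun s => decide (v < PySem.List.pyGetD s j 0)) : Int), cl, xs, ys) := by
  induction rows generalizing c with
  | nil => simp
  | cons r rows ih =>
    by_cases hp : v < PySem.List.pyGetD r j 0
    · have hne : ¬ (c + 1 = (ad.length : Int) - 1) := by omega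
      simp only [List.foldl_cons, pvA_innerStep, if_pos hp, if_neg hne]
      rw [ih (c + 1) (by omega)]
      simp only [List.countP_cons, decide_eq_true_eq, if_pos hp]
      have h' : c + 1 + ((rows.countP (fun s => decide (v < PySem.List.pyGetD s j 0)) : Nat) : Int)
          = c + ((rows.countP (fun s => decide (v < PySem.List.pyGetD s j 0)) + 1 : Nat) : Int) := by
        push_cast; ring
      rw [h']
    · simp only [List.foldl_cons, pvA_innerStep, if_neg hp]
      rw [ih c hc]
      simp [List.countP_cons, hp]

-- A's inner loop from a count below len-1: it fires exactly once iff the total number of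
-- strictly-greater rows reaches len-1.
theorem pvA_inner_char (ad : List (List Int)) (ax ay : List Int) (v j : Int)
    (rows : List (List Int)) (c cl : Int) (xs ys : List Int)
    (hc : c < (ad.length : Int) - 1) :
    rows.foldl (pvA_innerStep ad ax ay v j) (c, cl, xs, ys)
      = (if (ad.length : Int) - 1 ≤ c + (rows.countP (fun s => decide (v < PySem.List.pyGetD s j 0)) : Int)
         then (c + (rows.countP (fun s => decide (v < PySem.List.pyGetD s j 0)) : Int), cl + 1,
               xs ++ [PySem.List.pyGetD ax j 0], ys ++ [PySem.List.pyGetD ay j 0])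
         else (c + (rows.countP (fun s => decide (v < PySem.List.pyGetD s j 0)) : Int), cl, xs, ys)) := by
  induction rows generalizing c with
  | nil =>
    simp only [List.foldl_nil, List.countP_nil]
    rw [if_neg (by push_cast; omega)]
    simp
  | cons r rows ih =>
    by_cases hp : v < PySem.List.pyGetD r j 0
    · simp only [List.foldl_cons, pvA_innerStep, if_pos hp,
        List.countP_cons, decide_eq_true_eq]
      by_cases hfire : c + 1 = (ad.length : Int) - 1
      · rw [if_pos hfire]
        rw [pvA_inner_sat ad ax ay v j rows (c + 1) (cl + 1) _ _ (by omega)]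
        rw [if_pos (by push_cast; omega)]
        have h' : c + 1 + ((rows.countP (fun s => decide (v < PySem.List.pyGetD s j 0)) : Nat) : Int)
            = c + ((rows.countP (fun s => decide (v < PySem.List.pyGetD s j 0)) + 1 : Nat) : Int) := by
          push_cast; ring
        rw [h']
      · rw [if_neg hfire]
        rw [ih (c + 1) (by omega)]
        have h' : c + 1 + ((rows.countP (fun s => decide (v < PySem.List.pyGetD s j 0)) : Nat) : Int)
            = c + ((rows.countP (fun s => decide (v < PySem.List.pyGetD s j 0)) + 1 : Nat) : Int) := by
          push_cast; ring
        rw [h']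
    · simp only [List.foldl_cons, pvA_innerStep, if_neg hp,
        List.countP_cons, decide_eq_true_eq]
      rw [ih c hc]
      norm_num

-- generic: a list splits into entries above v, copies of v, and smaller-but-different entries
theorem pv_count_decomp (col : List Int) (v : Int) :
    col.length = col.countP (fun u => decide (v < u)) + col.count v
      + col.countP (fun u => (!decide (v < u)) && !(u == v)) := by
  induction col with
  | nil => simp
  | cons a l ih =>
    by_cases h1 : v < a
    · have h2 : ¬ (a = v) := by omega
      simp only [List.countP_cons, List.count_cons, List.length_cons, h1, h2,
        decide_true, decide_false, Bool.not_true, Bool.not_false, beq_iff_eq, if_true, if_false,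
        Bool.false_and, Bool.and_false]
      simp [ih]
      omega
    · by_cases h2 : a = v
      · simp only [List.countP_cons, List.count_cons, List.length_cons, h1, h2,
          decide_true, decide_false, Bool.not_true, Bool.not_false, beq_iff_eq, beq_self_eq_true,
          Bool.and_false]
        simp [ih]
        omega
      · simp only [List.countP_cons, List.count_cons, List.length_cons]
        have e1 : (decide (v < a)) = false := by simpa using h1
        have e2 : (a == v) = false := by simpa using h2
        simp [e1, e2, ih]
        omega

-- core characterisation: v is the unique minimum of col  <->  all other entries are strictly greater
theorem pv_min_count_char (col : List Int) (v m : Int) (hv : v ∈ col)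
    (hm : PySem.List.min? col (fun z => z) = some m) :
    (v = m ∧ col.count m = 1) ↔ col.countP (fun u => decide (v < u)) + 1 = col.length := by
  have hmmem : m ∈ col := PySem.List.min?_mem hm
  have hmin : ∀ y ∈ col, m ≤ y := PySem.List.min?_isMin hm
  have hdec := pv_count_decomp col v
  constructor
  · rintro ⟨rfl, hone⟩
    have hthird : col.countP (fun u => (!decide (v < u)) && !(u == v)) = 0 := by
      rw [List.countP_eq_zero]
      intro a ha
      have := hmin a ha
      simp only [Bool.and_eq_true, Bool.not_eq_true', decide_eq_false_iff_not, not_lt,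
        beq_eq_false_iff_ne, ne_eq]
      intro hle
      omega
    omega
  · intro hch
    have hpos : 1 ≤ col.count v := List.count_pos_iff.mpr hv
    have hone : col.count v = 1 := by omega
    have hthird : col.countP (fun u => (!decide (v < u)) && !(u == v)) = 0 := by omega
    have hlb : ∀ y ∈ col, v ≤ y := by
      intro y hy
      have hy0 := List.countP_eq_zero.mp hthird y hy
      by_cases hlt : v < y
      · omega
      · cases hE : (y == v) with
        | false => exact absurd (by simp [hlt, hE]) hy0
        | true =>
          have : y = v := by simpa using hE
          omega
    have hvm : v = m := le_antisymm (hlb m hmmem) (hmin v hv)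
    exact ⟨hvm, by rw [← hvm, hone]⟩

-- in-range lookup into the per-column tables
theorem pv_colmin_get (ad : List (List Int)) (L : Nat) (k : Nat) (hk : k < L) :
    PySem.List.pyGetD (pvB_colmin ad (L : Int)) (k : Int) 0
      = (PySem.List.min? (pvB_col ad (k : Int)) (fun v => v)).getD 0 := by
  unfold pvB_colmin
  exact PySem.List.pyGetD_map_pyRange _ L k 0 hk

theorem pv_colcnt_get (ad : List (List Int)) (L : Nat) (k : Nat) (hk : k < L) :
    PySem.List.pyGetD (pvB_colcnt ad (L : Int)) (k : Int) 0
      = ((pvB_col ad (k : Int)).count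
          (PySem.List.pyGetD (pvB_colmin ad (L : Int)) (k : Int) 0) : Int) := by
  unfold pvB_colcnt
  exact PySem.List.pyGetD_map_pyRange _ L k 0 hk

-- per-column equality of the two loop bodies, for a genuine cell (k, row[k]) of a grid row
theorem pv_colStep_eq (r0 : List Int) (rest : List (List Int)) (ax ay : List Int)
    (row : List Int) (hrow : row ∈ r0 :: rest) (hlen : row.length = r0.length)
    (k : Nat) (hk : k < row.length) (s : Int × List Int × List Int) :
    pvA_rowStep (r0 :: rest) ax ay s ((k : Int), row[k])
      = pvB_colStep ((r0 :: rest).length : Int)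
          (pvB_colmin (r0 :: rest) (r0.length : Int)) (pvB_colcnt (r0 :: rest) (r0.length : Int))
          ax ay s ((k : Int), row[k]) := by
  have hvget : PySem.List.pyGetD row (k : Int) 0 = row[k] := by
    rw [PySem.List.pyGetD_natCast]
    exact List.getD_eq_getElem row 0 hk
  set ad := r0 :: rest with had
  set v := row[k] with hvdef
  set cnt := ad.countP (fun sd => decide (v < PySem.List.pyGetD sd (k : Int) 0)) with hcnt
  have hcol : pvB_col ad (k : Int) = ad.map (fun r => PySem.List.pyGetD r (k : Int) 0) := rfl
  have hvcol : v ∈ pvB_col ad (k : Int) := by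
    rw [hcol]
    exact List.mem_map.mpr ⟨row, hrow, hvget⟩
  have hcolne : pvB_col ad (k : Int) ≠ [] := List.ne_nil_of_mem hvcol
  have hcollen : (pvB_col ad (k : Int)).length = ad.length := List.length_map _
  have hcntcol : (pvB_col ad (k : Int)).countP (fun u => decide (v < u)) = cnt := by
    rw [hcol, List.countP_map, hcnt]
    rfl
  -- the row itself is never strictly greater than its own entry, so cnt < len
  have hbound : cnt < ad.length := by
    have hle : cnt ≤ ad.length := by rw [hcnt]; exact List.countP_le_length
    have hne : cnt ≠ ad.length := by
      intro heq
      rw [hcnt] at heq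
      have := List.countP_eq_length.mp heq row hrow
      rw [hvget] at this
      simp at this
    omega
  obtain ⟨c0, t0, hct⟩ := List.exists_cons_of_ne_nil hcolne
  have hm : PySem.List.min? (pvB_col ad (k : Int)) (fun z => z) = some (t0.foldl min c0) := by
    rw [hct]
    exact PySem.List.min?_id_cons c0 t0
  set mval := t0.foldl min c0 with hmval
  have hminget : PySem.List.pyGetD (pvB_colmin ad (r0.length : Int)) (k : Int) 0 = mval := by
    rw [pv_colmin_get ad r0.length k (hlen ▸ hk), hm]
    rfl
  have hcntget : PySem.List.pyGetD (pvB_colcnt ad (r0.length : Int)) (k : Int) 0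
      = ((pvB_col ad (k : Int)).count mval : Int) := by
    rw [pv_colcnt_get ad r0.length k (hlen ▸ hk), hminget]
  -- unfold both steps
  show (ad.foldl (pvA_innerStep ad ax ay v (k : Int)) (0, s.1, s.2.1, s.2.2)).2
      = pvB_colStep (ad.length : Int) (pvB_colmin ad (r0.length : Int)) (pvB_colcnt ad (r0.length : Int)) ax ay s ((k : Int), v)
  by_cases hn : 1 < (ad.length : Int)
  · -- at least two rows: A fires iff cnt = len - 1 iff B's unique-minimum test holds
    rw [pvA_inner_char ad ax ay v (k : Int) ad 0 s.1 s.2.1 s.2.2 (by omega)]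
    have hiff : ((ad.length : Int) - 1 ≤ 0 + (cnt : Int))
        ↔ (1 < (ad.length : Int) ∧ v = PySem.List.pyGetD (pvB_colmin ad (r0.length : Int)) (k : Int) 0
            ∧ PySem.List.pyGetD (pvB_colcnt ad (r0.length : Int)) (k : Int) 0 = 1) := by
      rw [hminget, hcntget]
      constructor
      · intro hle
        have hch : (pvB_col ad (k : Int)).countP (fun u => decide (v < u)) + 1
            = (pvB_col ad (k : Int)).length := by
          rw [hcntcol, hcollen]; omega
        have hchar := (pv_min_count_char _ v mval hvcol hm).mpr hch
        refine ⟨hn, hchar.1, ?_⟩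
        exact_mod_cast hchar.2
      · rintro ⟨-, hveq, hcnt1⟩
        have hcount1 : (pvB_col ad (k : Int)).count mval = 1 := by
          have h1 : ((pvB_col ad (k : Int)).count mval : Int) = 1 := hcnt1
          omega
        have hchar := (pv_min_count_char _ v mval hvcol hm).mp ⟨hveq, hcount1⟩
        rw [hcntcol, hcollen] at hchar
        omega
    by_cases hfire : (ad.length : Int) - 1 ≤ 0 + (cnt : Int)
    · rw [if_pos hfire]
      unfold pvB_colStep
      rw [if_pos (hiff.mp hfire)]
    · rw [if_neg hfire]
      unfold pvB_colStep
      rw [if_neg (fun hcond => hfire (hiff.mpr hcond))]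
  · -- a single row: A's count==len-1 check (len-1 = 0) can never fire, B's guard is false
    rw [pvA_inner_sat ad ax ay v (k : Int) ad 0 s.1 s.2.1 s.2.2 (by omega)]
    unfold pvB_colStep
    rw [if_neg (by intro hcond; exact hn hcond.1)]

-- per-row equality: A's main-loop body computes exactly B's main-loop body
theorem pv_step_eq (r0 : List Int) (rest : List (List Int))
    (x y ax ay : List Int) (row : List Int)
    (hrow : row ∈ r0 :: rest) (hlen : row.length = r0.length) (i : Int)
    (acc : List Int × List (Int × Int)) :
    (acc.1 ++ [(pvA_helper (r0 :: rest) ax ay row x y i).1],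
     acc.2 ++ (pvA_helper (r0 :: rest) ax ay row x y i).2)
      = pvB_rowStep ((r0 :: rest).length : Int)
          (pvB_colmin (r0 :: rest) (r0.length : Int)) (pvB_colcnt (r0 :: rest) (r0.length : Int))
          ((PySem.List.min? x (fun v => v)).getD 0) ((PySem.List.max? x (fun v => v)).getD 0)
          ((PySem.List.min? y (fun v => v)).getD 0) ((PySem.List.max? y (fun v => v)).getD 0)
          x y ax ay acc (i, row) := by
  have hfold : (PySem.List.enumerate row 0).foldl (pvA_rowStep (r0 :: rest) ax ay) (0, [], [])
      = (PySem.List.enumerate row 0).foldl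
          (pvB_colStep ((r0 :: rest).length : Int)
            (pvB_colmin (r0 :: rest) (r0.length : Int)) (pvB_colcnt (r0 :: rest) (r0.length : Int)) ax ay)
          (0, [], []) := by
    apply PySem.List.foldl_congr_mem
    intro acc' q hq
    obtain ⟨k, hk, rfl⟩ := (PySem.List.mem_enumerate_iff row 0 q).mp hq
    have h0 : (0 : Int) + (k : Int) = (k : Int) := by omega
    rw [h0]
    exact pv_colStep_eq r0 rest ax ay row hrow hlen k hk acc'
  unfold pvA_helper pvA_coords_extremes pvB_rowStep
  rw [hfold]

-- ===== VERDICT (by name: the statement is the Claim_ definition above) =====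
theorem get_all_numbers_of_closest_points_spec : Claim_equal_get_all_numbers_of_closest_points := by
  intro all_distances x_coords y_coords all_x_coords all_y_coords _hdom hpre
  unfold Spec_get_all_numbers_of_closest_points
  obtain ⟨hshape, -, -, -, -⟩ := hpre
  cases all_distances with
  | nil =>
    rfl
  | cons r0 rest =>
    unfold get_all_numbers_of_closest_points get_all_numbers_of_closest_points_alt
    apply PySem.List.foldl_congr_mem
    intro acc p hp
    obtain ⟨k, hk, rfl⟩ := (PySem.List.mem_enumerate_iff (r0 :: rest) 0 p).mp hp
    have hrow : (r0 :: rest)[k] ∈ r0 :: rest := List.getElem_mem hk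
    have hlen : ((r0 :: rest)[k]).length = r0.length := by
      have := hshape _ hrow
      simpa using this
    have h0 : (0 : Int) + (k : Int) = (k : Int) := by omega
    rw [h0]
    exact pv_step_eq r0 rest x_coords y_coords all_x_coords all_y_coords _ hrow hlen (k : Int) acc
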